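-- pv_equiv track=rewrite | github.com/agmariona/JazzMaster | generate.py | squeeze_harmony
-- ===== SOURCE A (Python) =====
-- def squeeze_harmony(harmony, duration):
--     squeezed_harmony, squeezed_duration = [], []
--     prev_chord, running_duration = harmony[0], duration[0]
--     for i in range(1, len(harmony)):
--         if harmony[i] == prev_chord:
--             running_duration += duration[i]
--         else:
--             squeezed_harmony.append(prev_chord)
--             squeezed_duration.append(running_duration)
--             prev_chord, running_duration = harmony[i], duration[i]
--     squeezed_harmony.append(prev_chord)
--     squeezed_duration.append(running_duration)
--     return squeezed_harmony, squeezed_duration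
-- ===== SOURCE B (Python) =====
-- def squeeze_harmony(harmony, duration):
--     chords, durs = [], []
--     i, n = 0, len(harmony)
--     while i < n:
--         chord, total = harmony[i], duration[i]
--         i += 1
--         while i < n and harmony[i] == chord:
--             total += duration[i]
--             i += 1
--         chords.append(chord)
--         durs.append(total)
--     return chords, durs
-- ===== Notes on version B (the rewrite author's own statement) =====
-- stated objective: alternative
-- what changed: B walks the list with a two-pointer run scan: an inner while loop consumes each maximal run of equal chords and emits (chord, run total) per outer step, instead of A's single pass carrying prev_chord/running_duration state across every iteration.
import Mathlib
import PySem

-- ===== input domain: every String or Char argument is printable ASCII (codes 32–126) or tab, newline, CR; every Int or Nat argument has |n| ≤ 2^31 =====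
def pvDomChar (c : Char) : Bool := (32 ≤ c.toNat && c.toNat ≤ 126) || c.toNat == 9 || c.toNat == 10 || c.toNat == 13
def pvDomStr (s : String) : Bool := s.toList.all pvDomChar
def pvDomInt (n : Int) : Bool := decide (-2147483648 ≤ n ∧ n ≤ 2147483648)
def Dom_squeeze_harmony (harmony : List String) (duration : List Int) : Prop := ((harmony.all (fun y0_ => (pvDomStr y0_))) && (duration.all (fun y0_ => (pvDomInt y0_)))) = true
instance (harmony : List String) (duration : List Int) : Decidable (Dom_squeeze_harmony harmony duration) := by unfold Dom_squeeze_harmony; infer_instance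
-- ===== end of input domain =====

-- B merges consecutive equal chords by zipping once and consuming runs (run-length style)
-- instead of A's prev/running accumulator pass; same O(n) cost, different structure.

-- ===== PORT A =====
-- state: (squeezed_harmony, squeezed_duration, prev_chord, running_duration)
def pvStepA (harmony : List String) (duration : List Int)
    (st : List String × List Int × String × Int) (i : Int) : List String × List Int × String × Int :=
  if PySem.List.pyGetD harmony i "" == st.2.2.1 then
    (st.1, st.2.1, st.2.2.1, st.2.2.2 + PySem.List.pyGetD duration i 0)
  else
    (st.1 ++ [st.2.2.1], st.2.1 ++ [st.2.2.2],
     PySem.List.pyGetD harmony i "", PySem.List.pyGetD duration i 0)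

def squeeze_harmony (harmony : List String) (duration : List Int) : List String × List Int :=
  let prev := PySem.List.pyGetD harmony 0 ""
  let run := PySem.List.pyGetD duration 0 0
  let st := (PySem.List.pyRange 1 (harmony.length : Int) 1).foldl
              (pvStepA harmony duration) ([], [], prev, run)
  (st.1 ++ [st.2.2.1], st.2.1 ++ [st.2.2.2])

-- ===== PORT B =====
-- termination measure fact for the loops below
theorem pvSubLt (n i : Nat) (h : i < n) : n - (i + 1) < n - i := by omega

-- inner while loop: advance i over the run of `chord`, accumulating total
def pvInner (harmony : List String) (duration : List Int) (chord : String) (total : Int) (i : Nat) : Int × Nat :=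
  if h : i < harmony.length ∧ PySem.List.pyGetD harmony (i : Int) "" = chord then
    pvInner harmony duration chord (total + PySem.List.pyGetD duration (i : Int) 0) (i + 1)
  else (total, i)
  termination_by harmony.length - i
  decreasing_by exact pvSubLt _ _ h.1

-- the inner loop never moves i backwards (needed for the outer loop's termination)
theorem pvInner_le (harmony : List String) (duration : List Int) (chord : String) :
    ∀ (n i : Nat) (total : Int), harmony.length - i ≤ n → i ≤ (pvInner harmony duration chord total i).2 := by
  intro n
  induction n with
  | zero =>
    intro i total hn
    rw [pvInner]
    split
    · omega
    · simp
  | succ m ih =>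
    intro i total hn
    rw [pvInner]
    split
    · next h =>
      have := ih (i + 1) (total + PySem.List.pyGetD duration (i : Int) 0) (by omega)
      omega
    · simp

-- outer while loop: one iteration per run of equal chords
def pvOuter (harmony : List String) (duration : List Int) (chords : List String) (durs : List Int) (i : Nat) : List String × List Int :=
  if _h : i < harmony.length then
    let chord := PySem.List.pyGetD harmony (i : Int) ""
    let r := pvInner harmony duration chord (PySem.List.pyGetD duration (i : Int) 0) (i + 1)
    pvOuter harmony duration (chords ++ [chord]) (durs ++ [r.1]) r.2
  else (chords, durs)
  termination_by harmony.length - i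
  decreasing_by
    have := pvInner_le harmony duration (PySem.List.pyGetD harmony (i : Int) "")
      (harmony.length - (i + 1)) (i + 1) (PySem.List.pyGetD duration (i : Int) 0) (le_refl _)
    omega

def squeeze_harmony_alt (harmony : List String) (duration : List Int) : List String × List Int :=
  pvOuter harmony duration [] [] 0

-- ===== PRECONDITION & SPEC =====
-- Pre_ excludes exactly the inputs where A raises IndexError: empty harmony (harmony[0])
-- or a duration list shorter than harmony (duration[i]).
def Pre_squeeze_harmony (harmony : List String) (duration : List Int) : Prop :=
  harmony ≠ [] ∧ harmony.length ≤ duration.length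
instance (harmony : List String) (duration : List Int) : Decidable (Pre_squeeze_harmony harmony duration) := by
  unfold Pre_squeeze_harmony; infer_instance

def pvWitness_squeeze_harmony : List String × List Int := (["C", "C", "F"], [1, 2, 3])

def Spec_squeeze_harmony (harmony : List String) (duration : List Int) (out : List String × List Int) : Prop := out = squeeze_harmony_alt harmony duration
instance (harmony : List String) (duration : List Int) (out : List String × List Int) : Decidable (Spec_squeeze_harmony harmony duration out) := by unfold Spec_squeeze_harmony; infer_instance

-- ===== CLAIM (what is proved, stated in full; the proofs are below) =====
def Claim_equal_squeeze_harmony : Prop := ∀ (harmony : List String) (duration : List Int), Dom_squeeze_harmony harmony duration → Pre_squeeze_harmony harmony duration → Spec_squeeze_harmony harmony duration (squeeze_harmony harmony duration)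

-- ===== LEMMAS AND PROOFS =====

-- A's loop body, rewritten on the zipped tail as a structural recursion (bridge between the ports)
def pvListA (prev : String) (run : Int) : List (String × Int) → List String × List Int
  | [] => ([prev], [run])
  | (c, d) :: rest =>
    if c == prev then pvListA prev (run + d) rest
    else
      let r := pvListA c d rest
      (prev :: r.1, run :: r.2)

theorem pvOuter_bridge (harmony : List String) (duration : List Int) :
    ∀ (th : List String) (te : List Int) (k : Nat),
      harmony.drop k = th → duration.drop k = te → th.length ≤ te.length →
      ∀ (prev : String) (run : Int) (chords : List String) (durs : List Int),
      pvOuter harmony duration (chords ++ [prev])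
          (durs ++ [(pvInner harmony duration prev run k).1])
          (pvInner harmony duration prev run k).2
        = (chords ++ (pvListA prev run (th.zip te)).1, durs ++ (pvListA prev run (th.zip te)).2) := by
  intro th
  induction th with
  | nil =>
    intro te k hdh hdd _ prev run chords durs
    have hk : harmony.length ≤ k := by
      have := congrArg List.length hdh; simp at this; omega
    rw [pvInner]
    rw [dif_neg (by omega)]
    rw [pvOuter]
    rw [dif_neg (by omega)]
    simp [pvListA]
  | cons c th' ih =>
    intro te k hdh hdd hle prev run chords durs
    cases te with
    | nil => simp at hle
    | cons y te' =>
      have hk : k < harmony.length := by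
        have := congrArg List.length hdh; simp at this; omega
      have hgh : PySem.List.pyGetD harmony (k : Int) "" = c := by
        have hk0 : harmony[k]? = some c := by
          rw [show k = k + 0 by omega, ← List.getElem?_drop, hdh]; rfl
        simp [PySem.List.pyGetD_natCast, List.getD, hk0]
      have hgd : PySem.List.pyGetD duration (k : Int) 0 = y := by
        have hk0 : duration[k]? = some y := by
          rw [show k = k + 0 by omega, ← List.getElem?_drop, hdd]; rfl
        simp [PySem.List.pyGetD_natCast, List.getD, hk0]
      have hdh' : harmony.drop (k + 1) = th' := by
        have : harmony.drop (k+1) = (harmony.drop k).tail := by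
          rw [← List.drop_drop]; simp
        rw [this, hdh]; rfl
      have hdd' : duration.drop (k + 1) = te' := by
        have : duration.drop (k+1) = (duration.drop k).tail := by
          rw [← List.drop_drop]; simp
        rw [this, hdd]; rfl
      have hle' : th'.length ≤ te'.length := by simpa using hle
      by_cases hc : c = prev
      · rw [pvInner, dif_pos ⟨hk, by rw [hgh, hc]⟩, hgd]
        have := ih te' (k + 1) hdh' hdd' hle' prev (run + y) chords durs
        rw [this]
        simp [pvListA, hc]
      · rw [pvInner, dif_neg (by rw [hgh]; tauto)]
        rw [pvOuter, dif_pos hk]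
        simp only [hgh, hgd]
        have := ih te' (k + 1) hdh' hdd' hle' c y (chords ++ [prev]) (durs ++ [run])
        rw [this]
        simp [pvListA, hc, List.append_assoc]

theorem pvFoldA (harmony : List String) (duration : List Int) :
    ∀ (t : List String) (e : List Int) (k : Nat),
      harmony.drop k = t → duration.drop k = e → t.length ≤ e.length →
      ∀ (prev : String) (run : Int) (sh : List String) (sd : List Int),
      (let st := (PySem.List.pyRange (k : Int) (harmony.length : Int) 1).foldl
                   (pvStepA harmony duration) (sh, sd, prev, run)
       (st.1 ++ [st.2.2.1], st.2.1 ++ [st.2.2.2]))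
        = (sh ++ (pvListA prev run (t.zip e)).1, sd ++ (pvListA prev run (t.zip e)).2) := by
  intro t
  induction t with
  | nil =>
    intro e k hdh hdd hle prev run sh sd
    have hk : harmony.length ≤ k := by
      have := congrArg List.length hdh; simp at this; omega
    rw [PySem.List.pyRange_one_eq_nil (by exact_mod_cast hk)]
    simp [pvListA]
  | cons c t' ih =>
    intro e k hdh hdd hle prev run sh sd
    cases e with
    | nil => simp at hle
    | cons y e' =>
      have hk : k < harmony.length := by
        have := congrArg List.length hdh; simp at this; omega
      have hkd : k < duration.length := by
        have h1 := congrArg List.length hdh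
        have h2 := congrArg List.length hdd
        simp at h1 h2 hle; omega
      have hgh : PySem.List.pyGetD harmony (k : Int) "" = c := by
        have hk0 : harmony[k]? = some c := by
          rw [show k = k + 0 by omega, ← List.getElem?_drop, hdh]; rfl
        simp [PySem.List.pyGetD_natCast, List.getD, hk0]
      have hgd : PySem.List.pyGetD duration (k : Int) 0 = y := by
        have hk0 : duration[k]? = some y := by
          rw [show k = k + 0 by omega, ← List.getElem?_drop, hdd]; rfl
        simp [PySem.List.pyGetD_natCast, List.getD, hk0]
      have hdh' : harmony.drop (k + 1) = t' := by
        have : harmony.drop (k+1) = (harmony.drop k).tail := by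
          rw [← List.drop_drop]; simp
        rw [this, hdh]; rfl
      have hdd' : duration.drop (k + 1) = e' := by
        have : duration.drop (k+1) = (duration.drop k).tail := by
          rw [← List.drop_drop]; simp
        rw [this, hdd]; rfl
      have hle' : t'.length ≤ e'.length := by simpa using hle
      rw [PySem.List.pyRange_one_cons (by exact_mod_cast hk)]
      simp only [List.foldl_cons]
      by_cases hc : c == prev
      · have hstep : pvStepA harmony duration (sh, sd, prev, run) (k : Int)
            = (sh, sd, prev, run + y) := by
          simp [pvStepA, hgh, hgd, hc]
        rw [hstep]
        have hcast : ((k : Int) + 1) = ((k + 1 : Nat) : Int) := by push_cast; ring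
        rw [hcast]
        have := ih e' (k + 1) hdh' hdd' hle' prev (run + y) sh sd
        simp only at this ⊢
        rw [this]
        simp [pvListA, hc]
      · have hstep : pvStepA harmony duration (sh, sd, prev, run) (k : Int)
            = (sh ++ [prev], sd ++ [run], c, y) := by
          simp [pvStepA, hgh, hgd, hc]
        rw [hstep]
        have hcast : ((k : Int) + 1) = ((k + 1 : Nat) : Int) := by push_cast; ring
        rw [hcast]
        have := ih e' (k + 1) hdh' hdd' hle' c y (sh ++ [prev]) (sd ++ [run])
        simp only at this ⊢
        rw [this]
        simp [pvListA, hc, List.append_assoc]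

-- ===== VERDICT (by name: the statement is the Claim_ definition above) =====
theorem squeeze_harmony_spec : Claim_equal_squeeze_harmony := by
  intro harmony duration _ hpre
  obtain ⟨hne, hlen⟩ := hpre
  cases harmony with
  | nil => exact absurd rfl hne
  | cons x t =>
    cases duration with
    | nil => simp at hlen
    | cons y e =>
      unfold Spec_squeeze_harmony squeeze_harmony squeeze_harmony_alt
      have hle : t.length ≤ e.length := by simpa using hlen
      have h1 := pvFoldA (x :: t) (y :: e) t e 1 (by simp) (by simp) hle x y [] []
      simp only [Nat.cast_one] at h1
      have hgx : PySem.List.pyGetD (x :: t) (0 : Int) "" = x := by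
        simp [PySem.List.pyGetD]
      have hgy : PySem.List.pyGetD (y :: e) (0 : Int) 0 = y := by
        simp [PySem.List.pyGetD]
      have h2 := pvOuter_bridge (x :: t) (y :: e) t e 1 (by simp) (by simp) hle x y [] []
      rw [pvOuter, dif_pos (by simp)]
      simp only [hgx, hgy, Nat.cast_zero] at h1 h2 ⊢
      rw [show ((0 : Int)) = ((0 : Nat) : Int) by norm_num] at *
      simp only [PySem.List.pyGetD_natCast] at *
      rw [h1, show ((0 : Nat) + 1) = 1 from rfl, h2]
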